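-- pv_equiv track=rewrite | github.com/Carbon1777/centry-flutter | scripts/cold_start2_exec_sql.py | split_do_blocks
-- ===== SOURCE A (Python) =====
-- def split_do_blocks(sql_content):
--     """Split SQL file into individual DO $$ blocks."""
--     blocks = []
--     current = []
--     for line in sql_content.split('\n'):
--         current.append(line)
--         if line.strip() == 'END $$;':
--             blocks.append('\n'.join(current))
--             current = []
--     return blocks
-- ===== SOURCE B (Python) =====
-- def split_do_blocks(sql_content):
--     """Split SQL file into individual DO $$ blocks."""
--     lines = sql_content.split('\n')
--     bounds = [i for i, line in enumerate(lines) if line.strip() == 'END $$;']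
--     blocks = []
--     prev = 0
--     for b in bounds:
--         blocks.append('\n'.join(lines[prev:b + 1]))
--         prev = b + 1
--     return blocks
-- ===== Notes on version B (the rewrite author's own statement) =====
-- stated objective: alternative
-- what changed: B first finds all delimiter line indices via enumerate, then emits blocks by slicing lines[prev:b+1] per boundary, instead of A's single accumulating loop with a current buffer.
import Mathlib
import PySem

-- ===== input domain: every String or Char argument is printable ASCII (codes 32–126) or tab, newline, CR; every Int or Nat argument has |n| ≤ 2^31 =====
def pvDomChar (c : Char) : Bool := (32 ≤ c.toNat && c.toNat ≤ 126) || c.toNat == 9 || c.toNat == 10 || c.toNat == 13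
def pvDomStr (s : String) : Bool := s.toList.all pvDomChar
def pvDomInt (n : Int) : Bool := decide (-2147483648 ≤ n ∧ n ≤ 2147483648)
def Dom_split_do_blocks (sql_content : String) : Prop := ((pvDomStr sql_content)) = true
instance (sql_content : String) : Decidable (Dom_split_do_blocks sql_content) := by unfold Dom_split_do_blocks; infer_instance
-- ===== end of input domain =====

-- B finds all delimiter line indices first and then slices lines[prev:b+1] per boundary,
-- instead of A's single accumulating loop with a current buffer; same O(n) cost ('alternative').

-- ===== PORT A =====
-- A: one accumulating pass; 'current' grows until the stripped line equals 'END $$;'.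
def split_do_blocks (sql_content : String) : List String :=
  (((PySem.Chars.splitOn sql_content.toList "\n".toList).map String.ofList).foldl
    (fun (st : List String × List String) line =>
      let current := st.2 ++ [line]
      if PySem.Str.strip line == "END $$;" then
        (st.1 ++ [PySem.Str.join "\n" current], [])
      else
        (st.1, current))
    ([], [])).1

-- ===== PORT B =====
-- B: collect boundary indices with enumerate, then emit '\n'.join(lines[prev:b+1]) per boundary.
def split_do_blocks_alt (sql_content : String) : List String :=
  let lines := (PySem.Chars.splitOn sql_content.toList "\n".toList).map String.ofList
  let bounds := ((PySem.List.enumerate lines).filter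
      (fun p => PySem.Str.strip p.2 == "END $$;")).map (·.1)
  (bounds.foldl
    (fun (st : List String × Int) b =>
      (st.1 ++ [PySem.Str.join "\n" (PySem.List.slice lines (some st.2) (some (b + 1)))], b + 1))
    ([], (0 : Int))).1

-- ===== PRECONDITION & SPEC =====
def Spec_split_do_blocks (sql_content : String) (out : List String) : Prop := out = split_do_blocks_alt sql_content
instance (sql_content : String) (out : List String) : Decidable (Spec_split_do_blocks sql_content out) := by unfold Spec_split_do_blocks; infer_instance

-- ===== CLAIM (what is proved, stated in full; the proofs are below) =====
def Claim_equal_split_do_blocks : Prop := ∀ (sql_content : String), Dom_split_do_blocks sql_content → Spec_split_do_blocks sql_content (split_do_blocks sql_content)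

-- ===== LEMMAS AND PROOFS =====

-- the pure grouping both sides compute: segments ending at delimiter lines, tail dropped
def pvSegs (lines : List String) : List (List String) :=
  match lines with
  | [] => []
  | l :: ls =>
    if PySem.Str.strip l == "END $$;" then [l] :: pvSegs ls
    else match pvSegs ls with
      | [] => []
      | g :: gs => (l :: g) :: gs

def pvWithPrefix (cur : List String) (sgs : List (List String)) : List (List String) :=
  match sgs with
  | [] => []
  | g :: gs => (cur ++ g) :: gs

theorem pvWithPrefix_append (cur : List String) (l : String) (sgs : List (List String)) :
    pvWithPrefix cur (match sgs with | [] => [] | g :: gs => (l :: g) :: gs)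
      = pvWithPrefix (cur ++ [l]) sgs := by
  cases sgs <;> simp [pvWithPrefix]

-- A's fold, characterised with an arbitrary carried state
theorem pvA_fold (lines : List String) (blocks cur : List String) :
    (lines.foldl
      (fun (st : List String × List String) line =>
        let current := st.2 ++ [line]
        if PySem.Str.strip line == "END $$;" then
          (st.1 ++ [PySem.Str.join "\n" current], [])
        else
          (st.1, current))
      (blocks, cur)).1
    = blocks ++ (pvWithPrefix cur (pvSegs lines)).map (PySem.Str.join "\n") := by
  induction lines generalizing blocks cur with
  | nil => simp [pvWithPrefix, pvSegs]
  | cons l ls ih =>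
    rw [List.foldl_cons]
    by_cases h : PySem.Str.strip l == "END $$;"
    · simp only [h, if_true]
      rw [ih]
      cases hseg : pvSegs ls <;> simp [pvSegs, h, hseg, pvWithPrefix]
    · simp only [h, if_false, Bool.false_eq_true]
      have hseg : pvSegs (l :: ls)
          = (match pvSegs ls with | [] => [] | g :: gs => (l :: g) :: gs) := by
        simp [pvSegs, h]
      rw [ih, hseg, pvWithPrefix_append]

-- B's fold, characterised with a processed prefix 'pre' and carried start 'prev ≤ |pre|'
theorem pvB_fold (lines pre : List String) (blocks : List String) (prev : Nat)
    (hprev : prev ≤ pre.length) :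
    ((((PySem.List.enumerate lines ((pre.length : Int))).filter
        (fun p => PySem.Str.strip p.2 == "END $$;")).map (·.1)).foldl
      (fun (st : List String × Int) b =>
        (st.1 ++ [PySem.Str.join "\n"
          (PySem.List.slice (pre ++ lines) (some st.2) (some (b + 1)))], b + 1))
      (blocks, (prev : Int))).1
    = blocks ++ (pvWithPrefix (pre.drop prev) (pvSegs lines)).map (PySem.Str.join "\n") := by
  induction lines generalizing pre blocks prev with
  | nil => simp [PySem.List.enumerate, pvWithPrefix, pvSegs]
  | cons l ls ih =>
    rw [PySem.List.enumerate_cons]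
    have harg : (pre.length : Int) + 1 = (((pre ++ [l]).length : Nat) : Int) := by
      simp
    have happ : pre ++ l :: ls = (pre ++ [l]) ++ ls := by simp
    by_cases h : PySem.Str.strip l == "END $$;"
    · rw [List.filter_cons]
      simp only [h, if_true, List.map_cons, List.foldl_cons]
      have hslice : PySem.List.slice (pre ++ l :: ls) (some ((prev : Nat) : Int))
          (some ((pre.length : Int) + 1)) = pre.drop prev ++ [l] := by
        rw [show ((pre.length : Int) + 1) = ((pre.length + 1 : Nat) : Int) by push_cast; ring,
          PySem.List.slice_natCast, List.drop_append_of_le_length hprev, List.take_append]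
        rw [List.take_of_length_le (by simp; omega)]
        have h1 : pre.length + 1 - prev - (pre.drop prev).length = 1 := by simp; omega
        rw [h1]
        simp
      simp only [hslice]
      rw [happ, harg, ih (pre ++ [l]) _ (pre ++ [l]).length (le_refl _)]
      cases hseg : pvSegs ls <;> simp [pvSegs, h, hseg, pvWithPrefix]
    · rw [List.filter_cons]
      simp only [h, if_false, Bool.false_eq_true]
      rw [happ, harg, ih (pre ++ [l]) _ prev (by simp; omega)]
      have hdrop : (pre ++ [l]).drop prev = pre.drop prev ++ [l] :=
        List.drop_append_of_le_length hprev
      have hseg : pvSegs (l :: ls)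
          = (match pvSegs ls with | [] => [] | g :: gs => (l :: g) :: gs) := by
        simp [pvSegs, h]
      rw [hdrop, ← pvWithPrefix_append (pre.drop prev) l (pvSegs ls), hseg]

-- ===== VERDICT (by name: the statement is the Claim_ definition above) =====
theorem split_do_blocks_spec : Claim_equal_split_do_blocks := by
  intro sql_content _
  unfold Spec_split_do_blocks split_do_blocks split_do_blocks_alt
  rw [pvA_fold]
  have hB := pvB_fold ((PySem.Chars.splitOn sql_content.toList "\n".toList).map String.ofList)
    [] [] 0 (by simp)
  simp only [List.length_nil, Nat.cast_zero, List.nil_append, List.drop_nil] at hB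
  rw [hB]
  simp
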